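-- pv_equiv track=rewrite | github.com/dbins/bootcamp_powerbi_dio | Python/desafio_analytics6.py | agrupamento_idade
-- ===== SOURCE A (Python) =====
-- def agrupamento_idade(idades):
--     # Inicializa um dicionário com grupos de idade como chaves e contadores iniciados em zero como valores
--     grupos = {'0-18': 0, '19-35': 0, '36-50': 0, '51-70': 0, '71+': 0}
--
--     # Itera sobre cada idade na lista de idades
--     for idade in idades:
--         # Verifica em qual faixa etária a idade se encaixa e incrementa o contador apropriado
--         if idade <= 18:
--             grupos['0-18'] += 1
--         elif idade <= 35:
--             grupos['19-35'] += 1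
--         # TODO: Complete o código inserindo os demais grupos de faixas etárias
--         elif idade <= 50:
--             grupos['36-50'] += 1
--         elif idade <= 70:
--             grupos['51-70'] += 1
--         else:
--             grupos['71+'] += 1
--     return grupos
--
--     # Retorna o dicionário com a contagem de idades em cada grupo
--     return grupos
-- ===== SOURCE B (Python) =====
-- def agrupamento_idade(idades):
--     bounds = [18, 35, 50, 70]
--     labels = ['0-18', '19-35', '36-50', '51-70', '71+']
--     cum = [sum(1 for x in idades if x <= b) for b in bounds] + [len(idades)]
--     return {lab: c - p for lab, c, p in zip(labels, cum, [0] + cum)}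
-- ===== Notes on version B (the rewrite author's own statement) =====
-- stated objective: alternative
-- what changed: Replaces the per-element if/elif bucket selection by staged cumulative counting: for each threshold it counts how many ages are <= it, then derives each bucket as the difference of consecutive cumulative counts.
import Mathlib
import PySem

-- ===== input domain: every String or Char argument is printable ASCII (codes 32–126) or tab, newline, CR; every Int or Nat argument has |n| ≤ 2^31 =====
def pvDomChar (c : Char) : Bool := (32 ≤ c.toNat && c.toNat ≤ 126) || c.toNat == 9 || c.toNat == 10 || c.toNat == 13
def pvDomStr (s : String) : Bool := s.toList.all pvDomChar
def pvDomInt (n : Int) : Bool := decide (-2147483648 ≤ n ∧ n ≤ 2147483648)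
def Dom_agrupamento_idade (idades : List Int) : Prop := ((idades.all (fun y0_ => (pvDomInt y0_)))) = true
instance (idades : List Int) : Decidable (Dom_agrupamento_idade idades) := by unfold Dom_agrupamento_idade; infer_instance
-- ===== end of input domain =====

-- B replaces A's per-element if/elif bucketing by staged cumulative threshold counts whose consecutive differences give the buckets (alternative decomposition, same asymptotic cost).


-- ===== PORT A =====
def agrupamento_idade (idades : List Int) : List (String × Int) :=
  let grupos : PySem.Dict String Int :=
    ⟨[("0-18", 0), ("19-35", 0), ("36-50", 0), ("51-70", 0), ("71+", 0)]⟩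
  (idades.foldl (fun g idade =>
    if idade ≤ 18 then g.insert "0-18" (g.getD "0-18" 0 + 1)
    else if idade ≤ 35 then g.insert "19-35" (g.getD "19-35" 0 + 1)
    else if idade ≤ 50 then g.insert "36-50" (g.getD "36-50" 0 + 1)
    else if idade ≤ 70 then g.insert "51-70" (g.getD "51-70" 0 + 1)
    else g.insert "71+" (g.getD "71+" 0 + 1)) grupos).items

-- ===== PORT B =====
def agrupamento_idade_alt (idades : List Int) : List (String × Int) :=
  let bounds : List Int := [18, 35, 50, 70]
  let labels : List String := ["0-18", "19-35", "36-50", "51-70", "71+"]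
  let cum : List Int :=
    (bounds.map (fun b => ((idades.filter (fun x => x ≤ b)).length : Int))) ++ [(idades.length : Int)]
  (labels.zip (cum.zip ((0 : Int) :: cum))).map (fun p => (p.1, p.2.1 - p.2.2))

-- ===== PRECONDITION & SPEC =====
def Spec_agrupamento_idade (idades : List Int) (out : List (String × Int)) : Prop := out = agrupamento_idade_alt idades
instance (idades : List Int) (out : List (String × Int)) : Decidable (Spec_agrupamento_idade idades out) := by unfold Spec_agrupamento_idade; infer_instance

-- ===== CLAIM (what is proved, stated in full; the proofs are below) =====
def Claim_equal_agrupamento_idade : Prop := ∀ (idades : List Int), Dom_agrupamento_idade idades → Spec_agrupamento_idade idades (agrupamento_idade idades)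

-- ===== LEMMAS AND PROOFS =====

-- the five disjoint bucket counts (proof-only helpers)
def pvN1 (xs : List Int) : Int := ((xs.filter (fun x => x ≤ 18)).length : Int)
def pvN2 (xs : List Int) : Int := ((xs.filter (fun x => 18 < x ∧ x ≤ 35)).length : Int)
def pvN3 (xs : List Int) : Int := ((xs.filter (fun x => 35 < x ∧ x ≤ 50)).length : Int)
def pvN4 (xs : List Int) : Int := ((xs.filter (fun x => 50 < x ∧ x ≤ 70)).length : Int)
def pvN5 (xs : List Int) : Int := ((xs.filter (fun x => 70 < x)).length : Int)

-- A's fold characterised: starting from accumulators (a,b,c,d,e) it adds the disjoint bucket counts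
theorem pv_foldA (xs : List Int) : ∀ (a b c d e : Int),
    (xs.foldl (fun g idade =>
      if idade ≤ 18 then g.insert "0-18" (g.getD "0-18" 0 + 1)
      else if idade ≤ 35 then g.insert "19-35" (g.getD "19-35" 0 + 1)
      else if idade ≤ 50 then g.insert "36-50" (g.getD "36-50" 0 + 1)
      else if idade ≤ 70 then g.insert "51-70" (g.getD "51-70" 0 + 1)
      else g.insert "71+" (g.getD "71+" 0 + 1))
      (⟨[("0-18", a), ("19-35", b), ("36-50", c), ("51-70", d), ("71+", e)]⟩ : PySem.Dict String Int)).items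
    = [("0-18", a + pvN1 xs), ("19-35", b + pvN2 xs), ("36-50", c + pvN3 xs),
       ("51-70", d + pvN4 xs), ("71+", e + pvN5 xs)] := by
  induction xs with
  | nil => intro a b c d e; simp [pvN1, pvN2, pvN3, pvN4, pvN5]
  | cons x xs ih =>
    intro a b c d e
    simp only [List.foldl_cons]
    by_cases h1 : x ≤ 18
    · rw [if_pos h1,
        show (PySem.Dict.insert (⟨[("0-18", a), ("19-35", b), ("36-50", c), ("51-70", d), ("71+", e)]⟩ : PySem.Dict String Int) "0-18" ((⟨[("0-18", a), ("19-35", b), ("36-50", c), ("51-70", d), ("71+", e)]⟩ : PySem.Dict String Int).getD "0-18" 0 + 1)) = ⟨[("0-18", a + 1), ("19-35", b), ("36-50", c), ("51-70", d), ("71+", e)]⟩ from rfl,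
        ih (a + 1) b c d e]
      simp [pvN1, pvN2, pvN3, pvN4, pvN5, List.filter_cons]
      split_ifs <;> simp only [List.length_cons, and_true, true_and] <;> push_cast <;> omega
    · by_cases h2 : x ≤ 35
      · rw [if_neg h1, if_pos h2,
          show (PySem.Dict.insert (⟨[("0-18", a), ("19-35", b), ("36-50", c), ("51-70", d), ("71+", e)]⟩ : PySem.Dict String Int) "19-35" ((⟨[("0-18", a), ("19-35", b), ("36-50", c), ("51-70", d), ("71+", e)]⟩ : PySem.Dict String Int).getD "19-35" 0 + 1)) = ⟨[("0-18", a), ("19-35", b + 1), ("36-50", c), ("51-70", d), ("71+", e)]⟩ from rfl,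
          ih a (b + 1) c d e]
        simp [pvN1, pvN2, pvN3, pvN4, pvN5, List.filter_cons]
        split_ifs <;> simp only [List.length_cons, and_true, true_and] <;> push_cast <;> omega
      · by_cases h3 : x ≤ 50
        · rw [if_neg h1, if_neg h2, if_pos h3,
            show (PySem.Dict.insert (⟨[("0-18", a), ("19-35", b), ("36-50", c), ("51-70", d), ("71+", e)]⟩ : PySem.Dict String Int) "36-50" ((⟨[("0-18", a), ("19-35", b), ("36-50", c), ("51-70", d), ("71+", e)]⟩ : PySem.Dict String Int).getD "36-50" 0 + 1)) = ⟨[("0-18", a), ("19-35", b), ("36-50", c + 1), ("51-70", d), ("71+", e)]⟩ from rfl,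
            ih a b (c + 1) d e]
          simp [pvN1, pvN2, pvN3, pvN4, pvN5, List.filter_cons]
          split_ifs <;> simp only [List.length_cons, and_true, true_and] <;> push_cast <;> omega
        · by_cases h4 : x ≤ 70
          · rw [if_neg h1, if_neg h2, if_neg h3, if_pos h4,
              show (PySem.Dict.insert (⟨[("0-18", a), ("19-35", b), ("36-50", c), ("51-70", d), ("71+", e)]⟩ : PySem.Dict String Int) "51-70" ((⟨[("0-18", a), ("19-35", b), ("36-50", c), ("51-70", d), ("71+", e)]⟩ : PySem.Dict String Int).getD "51-70" 0 + 1)) = ⟨[("0-18", a), ("19-35", b), ("36-50", c), ("51-70", d + 1), ("71+", e)]⟩ from rfl,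
              ih a b c (d + 1) e]
            simp [pvN1, pvN2, pvN3, pvN4, pvN5, List.filter_cons]
            split_ifs <;> simp only [List.length_cons, and_true, true_and] <;> push_cast <;> omega
          · rw [if_neg h1, if_neg h2, if_neg h3, if_neg h4,
              show (PySem.Dict.insert (⟨[("0-18", a), ("19-35", b), ("36-50", c), ("51-70", d), ("71+", e)]⟩ : PySem.Dict String Int) "71+" ((⟨[("0-18", a), ("19-35", b), ("36-50", c), ("51-70", d), ("71+", e)]⟩ : PySem.Dict String Int).getD "71+" 0 + 1)) = ⟨[("0-18", a), ("19-35", b), ("36-50", c), ("51-70", d), ("71+", e + 1)]⟩ from rfl,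
              ih a b c d (e + 1)]
            simp [pvN1, pvN2, pvN3, pvN4, pvN5, List.filter_cons]
            split_ifs <;> simp only [List.length_cons, and_true, true_and] <;> push_cast <;> omega

-- cumulative counts decompose into the disjoint bucket counts
set_option maxHeartbeats 1000000 in
theorem pv_cum (xs : List Int) :
    ((xs.filter (fun x => x ≤ (18:Int))).length : Int) = pvN1 xs ∧
    ((xs.filter (fun x => x ≤ (35:Int))).length : Int) = pvN1 xs + pvN2 xs ∧
    ((xs.filter (fun x => x ≤ (50:Int))).length : Int) = pvN1 xs + pvN2 xs + pvN3 xs ∧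
    ((xs.filter (fun x => x ≤ (70:Int))).length : Int) = pvN1 xs + pvN2 xs + pvN3 xs + pvN4 xs ∧
    (xs.length : Int) = pvN1 xs + pvN2 xs + pvN3 xs + pvN4 xs + pvN5 xs := by
  induction xs with
  | nil => simp [pvN1, pvN2, pvN3, pvN4, pvN5]
  | cons x xs ih =>
    obtain ⟨i1, i2, i3, i4, i5⟩ := ih
    simp only [pvN1, pvN2, pvN3, pvN4, pvN5] at i1 i2 i3 i4 i5
    simp only [pvN1, pvN2, pvN3, pvN4, pvN5, List.filter_cons, decide_eq_true_eq,
      List.length_cons]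
    split_ifs <;> (try simp only [List.length_cons]) <;> push_cast at i1 i2 i3 i4 i5 ⊢ <;> (try simp only [true_and]) <;> omega

-- ===== VERDICT (by name: the statement is the Claim_ definition above) =====
theorem agrupamento_idade_spec : Claim_equal_agrupamento_idade := by
  intro idades _
  show agrupamento_idade idades = agrupamento_idade_alt idades
  obtain ⟨i1, i2, i3, i4, i5⟩ := pv_cum idades
  simp only [agrupamento_idade, agrupamento_idade_alt, pv_foldA idades 0 0 0 0 0,
    List.map_cons, List.map_nil, List.cons_append, List.nil_append,
    List.zip_cons_cons, i1, i2, i3, i4, i5]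
  norm_num
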